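-- pv_equiv track=rewrite | github.com/JuanmaZimm/TDA-AyED3-2024-1C | p2/1_izqDominante.py | izqDominante
-- ===== SOURCE A (Python) =====
-- def izqDominante(list: list) -> bool:
--     if (len(list) == 2):  # O(1)
--         return list[0] > list[1]  # O(1)
--     n = len(list)  # O(1)
--     half1 = list[:n//2]  # O(n)
--     half2 = list[n//2:]  # O(n)
--     if sum(half1) <= sum(half2):  # O(n)
--         return False
--     else:
--         return izqDominante(half1) and izqDominante(half2)  # O(1)
-- ===== SOURCE B (Python) =====
-- def izqDominante(list: list) -> bool:
--     # Single bottom-up pass over index ranges: each recursive call returns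
--     # (dominance flag, segment sum), so no slicing and no repeated summing.
--     def dom(i, j):
--         if j - i < 2:
--             return (False, list[i] if j - i == 1 else 0)
--         if j - i == 2:
--             a, b = list[i], list[i + 1]
--             return (a > b, a + b)
--         m = i + (j - i) // 2
--         b1, s1 = dom(i, m)
--         b2, s2 = dom(m, j)
--         return (s1 > s2 and b1 and b2, s1 + s2)
--     return dom(0, len(list))[0]
-- ===== Notes on version B (the rewrite author's own statement) =====
-- stated objective: alternative
-- what changed: Replaces A's top-down recursion with list slicing and re-summing at every level by a single bottom-up recursion over index ranges that returns (dominance flag, segment sum), so sums are combined in O(1) and no sublists are built.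
import Mathlib
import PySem

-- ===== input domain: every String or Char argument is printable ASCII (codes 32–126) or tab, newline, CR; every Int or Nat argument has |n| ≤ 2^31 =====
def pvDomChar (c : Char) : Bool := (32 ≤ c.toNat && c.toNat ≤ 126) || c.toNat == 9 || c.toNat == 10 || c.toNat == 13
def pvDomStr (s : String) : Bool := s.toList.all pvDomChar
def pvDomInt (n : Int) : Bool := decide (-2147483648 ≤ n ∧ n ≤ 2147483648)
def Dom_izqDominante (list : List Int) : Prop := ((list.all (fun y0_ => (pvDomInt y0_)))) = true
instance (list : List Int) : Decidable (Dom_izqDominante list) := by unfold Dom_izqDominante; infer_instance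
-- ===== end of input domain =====

-- B replaces A's slice-and-resum top-down recursion by one bottom-up recursion over index
-- ranges returning (flag, segment sum); same return value, no claim about speed.

-- ===== PORT A =====
-- Python's recursion is not structurally decreasing (a length-1 input recurses on itself,
-- harmlessly thanks to `and` short-circuiting on the False of the empty half), so the port
-- carries a fuel counter as a pure totality guard; fuel = length+1 suffices (proved below).
def izqDominanteGo : Nat → List Int → Bool
  | 0, _ => false  -- fuel guard only
  | fuel + 1, list =>
    if list.length = 2 then
      -- list[0] > list[1]; both indices in range since len = 2
      decide (((PySem.List.pyGet? list 0).getD 0) > ((PySem.List.pyGet? list 1).getD 0))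
    else
      let n : Int := list.length
      let half1 := PySem.List.slice list none (some (PySem.Int.floordiv n 2))
      let half2 := PySem.List.slice list (some (PySem.Int.floordiv n 2)) none
      if half1.sum ≤ half2.sum then false
      else izqDominanteGo fuel half1 && izqDominanteGo fuel half2

def izqDominante (list : List Int) : Bool := izqDominanteGo (list.length + 1) list

-- ===== PORT B =====
-- dom i j: (dominance flag, sum) of the segment list[i:j]
def domAlt (list : List Int) (i j : Nat) : Bool × Int :=
  if _h1 : j - i < 2 then (false, if j - i = 1 then list.getD i 0 else 0)
  else if _h2 : j - i = 2 then
    let a := list.getD i 0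
    let b := list.getD (i + 1) 0
    (decide (a > b), a + b)
  else
    let m := i + (j - i) / 2
    let p1 := domAlt list i m
    let p2 := domAlt list m j
    (decide (p1.2 > p2.2) && p1.1 && p2.1, p1.2 + p2.2)
termination_by j - i
decreasing_by all_goals omega

def izqDominante_alt (list : List Int) : Bool := (domAlt list 0 list.length).1

-- ===== PRECONDITION & SPEC =====
def Spec_izqDominante (list : List Int) (out : Bool) : Prop := out = izqDominante_alt list
instance (list : List Int) (out : Bool) : Decidable (Spec_izqDominante list out) := by unfold Spec_izqDominante; infer_instance

-- ===== CLAIM (what is proved, stated in full; the proofs are below) =====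
def Claim_equal_izqDominante : Prop := ∀ (list : List Int), Dom_izqDominante list → Spec_izqDominante list (izqDominante list)

-- ===== LEMMAS AND PROOFS =====

-- reference function: the common value of both programs, by well-founded recursion on length
def domF (l : List Int) : Bool :=
  if _h1 : l.length < 2 then false
  else if _h2 : l.length = 2 then decide (l.getD 0 0 > l.getD 1 0)
  else
    let h1 := l.take (l.length / 2)
    let h2 := l.drop (l.length / 2)
    if h1.sum ≤ h2.sum then false else domF h1 && domF h2
termination_by l.length
decreasing_by
  · simp only [List.length_take]; omega
  · simp only [List.length_drop]; omega

theorem go_nil (fuel : Nat) : izqDominanteGo fuel [] = false := by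
  cases fuel <;> simp [izqDominanteGo, PySem.List.slice]

theorem go_eq_domF : ∀ (fuel : Nat) (l : List Int), l.length < fuel →
    izqDominanteGo fuel l = domF l := by
  intro fuel
  induction fuel with
  | zero => intro l h; omega
  | succ f ih =>
    intro l h
    have hfd : PySem.Int.floordiv (l.length : Int) 2 = ((l.length / 2 : Nat) : Int) :=
      PySem.Int.floordiv_natCast l.length 2
    rw [izqDominanteGo]
    simp only [hfd, PySem.List.slice_to_natCast, PySem.List.slice_from_natCast]
    by_cases h2 : l.length = 2
    · rw [domF]
      rcases l with _ | ⟨a, _ | ⟨b, _ | ⟨c, t⟩⟩⟩ <;> simp_all [PySem.List.pyGet?, PySem.List.pyIdx?]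
    · simp only [if_neg h2]
      by_cases hsm : (l.take (l.length / 2)).sum ≤ (l.drop (l.length / 2)).sum
      · rw [domF]
        by_cases hlt : l.length < 2
        · simp [hsm, hlt]
        · simp [hsm, hlt, h2]
      · simp only [if_neg hsm]
        by_cases hlt : l.length < 2
        · -- length 0 or 1: the short half is empty, so the conjunction is False, as is domF
          interval_cases hl : l.length
          · have hnil : l = [] := List.length_eq_zero_iff.mp hl
            subst hnil
            simp at hsm
          · have h0 : List.take (1 / 2) l = [] := by norm_num
            rw [h0, go_nil, domF]
            simp [hl]
        · have h3 : 3 ≤ l.length := by omega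
          rw [ih _ (by simp; omega), ih _ (by simp; omega)]
          conv_rhs => rw [domF]
          simp [hsm, hlt, h2]

-- segment of list between indices i and j
theorem seg_len (l : List Int) (i j : Nat) (_hij : i ≤ j) (hj : j ≤ l.length) :
    ((l.drop i).take (j - i)).length = j - i := by
  simp; omega

theorem domAlt_eq_domF : ∀ (k : Nat) (l : List Int) (i j : Nat), j - i ≤ k → i ≤ j → j ≤ l.length →
    domAlt l i j = (domF ((l.drop i).take (j - i)), ((l.drop i).take (j - i)).sum) := by
  intro k
  induction k with
  | zero =>
    intro l i j hk hij hj
    have : j = i := by omega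
    subst this
    rw [domAlt, domF]
    simp
  | succ k ih =>
    intro l i j hk hij hj
    set seg := (l.drop i).take (j - i) with hseg
    have hlen : seg.length = j - i := seg_len l i j hij hj
    rw [domAlt]
    by_cases h1 : j - i < 2
    · rw [domF]
      simp only [hlen, dif_pos h1]
      by_cases he : j - i = 1
      · have hi : i < l.length := by omega
        have : seg = [l.getD i 0] := by
          rw [hseg, he]
          rw [List.take_one]
          rw [List.head?_drop]
          simp [List.getD, List.getElem?_eq_getElem hi]
        simp [he, this]
      · have : j - i = 0 := by omega
        simp [hseg, this]
    · by_cases h2 : j - i = 2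
      · have hi1 : i + 1 < l.length := by omega
        have hi : i < l.length := by omega
        have hseg2 : seg = [l.getD i 0, l.getD (i+1) 0] := by
          rw [hseg, h2]
          have : l.drop i = l.getD i 0 :: l.getD (i+1) 0 :: l.drop (i+2) := by
            have e1 : l.getD i 0 = l[i] := by simp [List.getD, List.getElem?_eq_getElem hi]
            have e2 : l.getD (i+1) 0 = l[i+1] := by simp [List.getD, List.getElem?_eq_getElem hi1]
            rw [e1, e2]
            rw [List.drop_eq_getElem_cons (by omega)]
            congr 1
            rw [List.drop_eq_getElem_cons (by omega)]
          rw [this]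
          simp
        rw [domF]
        simp only [dif_neg h1, dif_pos h2, hseg2]
        simp
      · -- j - i ≥ 3
        have h3 : 3 ≤ j - i := by omega
        set m := i + (j - i) / 2 with hm
        have hmi : m - i = (j - i) / 2 := by omega
        have h1s : (l.drop i).take (m - i) = seg.take (seg.length / 2) := by
          rw [hlen, hmi, hseg, List.take_take]
          congr 1 <;> omega
        have h2s : (l.drop m).take (j - m) = seg.drop (seg.length / 2) := by
          rw [hlen, hseg, List.drop_take]
          have : l.drop m = (l.drop i).drop ((j-i)/2) := by
            rw [List.drop_drop]
          rw [this]
          congr 1 <;> omega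
        simp only [dif_neg h1, dif_neg h2]
        rw [ih l i m (by omega) (by omega) (by omega),
            ih l m j (by omega) (by omega) (by omega)]
        rw [h1s, h2s]
        conv_rhs => rw [domF]
        simp only [dif_neg (by omega : ¬ seg.length < 2), dif_neg (by omega : ¬ seg.length = 2)]
        have hsum : (seg.take (seg.length / 2)).sum + (seg.drop (seg.length / 2)).sum = seg.sum := by
          rw [← List.sum_append, List.take_append_drop]
        rw [Prod.mk.injEq]
        refine ⟨?_, hsum⟩
        by_cases hle : (seg.take (seg.length / 2)).sum ≤ (seg.drop (seg.length / 2)).sum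
        case pos => simp [hle, not_lt.mpr hle]
        case neg =>
          simp only [if_neg hle]
          have : (seg.drop (seg.length / 2)).sum < (seg.take (seg.length / 2)).sum := by omega
          simp [this]

-- ===== VERDICT (by name: the statement is the Claim_ definition above) =====
theorem izqDominante_spec : Claim_equal_izqDominante := by
  intro l _
  unfold Spec_izqDominante izqDominante izqDominante_alt
  rw [go_eq_domF (l.length + 1) l (by omega),
      domAlt_eq_domF l.length l 0 l.length (by omega) (by omega) (by omega)]
  simp
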